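-- pv_equiv track=rewrite | github.com/owenkobasz/chronicle | chronicle/organize_photos.py | normalize_camera_name
-- ===== SOURCE A (Python) =====
-- def normalize_camera_name(raw_make: str | None, raw_model: str | None) -> str:
--     """
--     Clean up camera make/model into a folder-friendly name with improved normalization.
--     Examples:
--       Make='Apple', Model='iPhone 14 Pro' -> 'Apple_iPhone_14_Pro'
--       Make=None, Model='NIKON D5300' -> 'Nikon_D5300'
--       Make='SONY', Model='ILCE-7M3' -> 'Sony_A7III'
--     """
--     if not raw_make and not raw_model:
--         return "UnknownCamera"
--
--     def clean(s: str) -> str: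
--         s = s.strip()
--         # Remove common prefixes/suffixes
--         s = s.replace("Corporation", "").replace("Inc.", "").replace("Inc", "")
--         s = s.replace("Company", "").replace("Ltd.", "").replace("Ltd", "")
--         s = s.strip()
--         # Basic capitalization polish - preserve existing capitalization for known brands
--         parts = s.split()
--         cleaned_parts = []
--         for part in parts:
--             # Preserve common brand names
--             part_lower = part.lower()
--             if part_lower in ["iphone", "ipad", "dji", "gopro", "sony", "canon", "nikon", "fujifilm", "olympus", "panasonic", "pentax", "leica", "hasselblad"]:
--                 cleaned_parts.append(part.capitalize())
--             elif part_lower.startswith("ilce-") or part_lower.startswith("dsc-"):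
--                 # Sony model numbers - preserve format
--                 cleaned_parts.append(part.upper())
--             else:
--                 # Normal capitalization
--                 cleaned_parts.append(part.capitalize())
--         s = " ".join(cleaned_parts)
--         # Replace spaces and slashes with underscores
--         for ch in (" ", "/", "\\", "-"):
--             s = s.replace(ch, "_")
--         # Remove multiple underscores
--         while "__" in s:
--             s = s.replace("__", "_")
--         # Remove leading/trailing underscores
--         s = s.strip("_")
--         return s
--
--     make = clean(raw_make) if raw_make else ""
--     model = clean(raw_model) if raw_model else ""
--
--     # Normalize common camera model names
--     model_normalized = model
--     # Sony ILCE-7M3 -> A7III, ILCE-7RM4 -> A7RIV, etc.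
--     if "ILCE_7M3" in model_normalized or "ILCE_7M3" in model_normalized:
--         model_normalized = "A7III"
--     elif "ILCE_7M4" in model_normalized:
--         model_normalized = "A7IV"
--     elif "ILCE_7RM3" in model_normalized or "ILCE_7RM3A" in model_normalized:
--         model_normalized = "A7RIII"
--     elif "ILCE_7RM4" in model_normalized:
--         model_normalized = "A7RIV"
--     elif "ILCE_7RM5" in model_normalized:
--         model_normalized = "A7RV"
--     elif "ILCE_9" in model_normalized:
--         model_normalized = "A9"
--     elif "ILCE_1" in model_normalized:
--         model_normalized = "A1"
--     # DJI normalization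
--     elif "MAVIC" in model_normalized.upper() and "3" in model_normalized:
--         model_normalized = "Mavic3"
--     elif "MAVIC" in model_normalized.upper() and "2" in model_normalized:
--         model_normalized = "Mavic2"
--     # iPhone normalization
--     elif "IPHONE" in model_normalized.upper():
--         # Extract model number if present
--         parts = model_normalized.split("_")
--         for part in parts:
--             if "IPHONE" in part.upper() and any(c.isdigit() for c in part):
--                 model_normalized = part.replace("_", "")
--                 break
--
--     # Avoid super-redundant names like "Nikon_Nikon_D5300"
--     if make and model_normalized:
--         if model_normalized.lower().startswith(make.lower()):
--             return model_normalized
--         return f"{make}_{model_normalized}"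
--     return make or model_normalized or "UnknownCamera"
-- ===== SOURCE B (Python) =====
-- # B: clean() is rebuilt as a tokenizer -- instead of join+4 replace passes+"__"
-- # squash loop+strip("_"), it accumulates maximal runs of non-separator characters
-- # and joins them with "_"; the Sony if/elif cascade becomes an ordered
-- # (substring, name) table scan; the final assembly is a single name-or-fallback
-- # expression. Objective: simpler.
--
-- _JUNK = ("Corporation", "Inc.", "Inc", "Company", "Ltd.", "Ltd")
-- _MODELS = [
--     ("ILCE_7M3", "A7III"),
--     ("ILCE_7M4", "A7IV"),
--     ("ILCE_7RM3", "A7RIII"),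
--     ("ILCE_7RM4", "A7RIV"),
--     ("ILCE_7RM5", "A7RV"),
--     ("ILCE_9", "A9"),
--     ("ILCE_1", "A1"),
-- ]
-- _SEPS = " /\\-_"
--
--
-- def _fix_word(w):
--     return w.upper() if w.lower().startswith(("ilce-", "dsc-")) else w.capitalize()
--
--
-- def _clean(s):
--     s = s.strip()
--     for junk in _JUNK:
--         s = s.replace(junk, "")
--     tokens = []
--     for word in s.split():
--         cur = ""
--         for ch in _fix_word(word):
--             if ch in _SEPS:
--                 if cur:
--                     tokens.append(cur)
--                     cur = ""
--             else:
--                 cur += ch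
--         if cur:
--             tokens.append(cur)
--     return "_".join(tokens)
--
--
-- def _canonical_model(model):
--     for pat, name in _MODELS:
--         if pat in model:
--             return name
--     u = model.upper()
--     if "MAVIC" in u:
--         if "3" in model:
--             return "Mavic3"
--         if "2" in model:
--             return "Mavic2"
--     if "IPHONE" in u:
--         for part in model.split("_"):
--             if "IPHONE" in part.upper() and any(c.isdigit() for c in part):
--                 return part
--     return model
--
--
-- def normalize_camera_name(raw_make, raw_model):
--     make = _clean(raw_make or "")
--     model = _canonical_model(_clean(raw_model or ""))
--     if model.lower().startswith(make.lower()):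
--         name = model
--     else:
--         name = "_".join(p for p in (make, model) if p)
--     return name or "UnknownCamera"
-- ===== Notes on version B (the rewrite author's own statement) =====
-- stated objective: simpler
-- what changed: B rebuilds clean() as a run tokenizer that accumulates maximal runs of non-separator characters and joins them with '_' (replacing A's space-join, four sequential replace() passes, while-loop '__' squashing and strip('_')), replaces the Sony if/elif cascade with an ordered (substring, name) table scanned for the first match, and collapses A's four-way return logic into a single name-or-fallback expression.
import Mathlib
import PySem

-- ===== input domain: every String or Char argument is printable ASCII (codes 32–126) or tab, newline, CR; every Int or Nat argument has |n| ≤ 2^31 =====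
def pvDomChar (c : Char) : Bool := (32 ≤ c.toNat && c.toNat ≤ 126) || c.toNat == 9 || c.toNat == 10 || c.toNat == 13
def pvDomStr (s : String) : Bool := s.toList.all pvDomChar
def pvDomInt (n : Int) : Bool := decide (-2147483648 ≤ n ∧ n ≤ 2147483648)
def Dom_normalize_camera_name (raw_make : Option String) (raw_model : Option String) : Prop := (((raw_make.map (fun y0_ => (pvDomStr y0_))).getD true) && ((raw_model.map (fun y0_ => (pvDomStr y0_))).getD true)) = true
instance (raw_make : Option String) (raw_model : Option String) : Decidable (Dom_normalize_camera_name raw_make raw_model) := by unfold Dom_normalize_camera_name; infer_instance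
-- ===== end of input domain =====

-- B rebuilds clean() as a run tokenizer (maximal runs of non-separator characters
-- joined with "_") in place of A's join + four replace passes + "__"-squash loop +
-- strip("_"), replaces the Sony if/elif cascade by an ordered substring table scan,
-- and folds the final assembly into one name-or-fallback expression; same return
-- value, objective: simpler.

-- hand port of str.capitalize (first char uppercased, rest lowered) — no PySem primitive;
-- exact on the ASCII domain, used by both ports (both Pythons call the builtin).
def pyCapitalize (cs : List Char) : List Char :=
  match cs with
  | [] => []
  | c :: t => PySem.Chars.upperChar c :: PySem.Chars.lower t

-- ===== PORT A =====

def brandsA : List (List Char) :=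
  [ "iphone".toList, "ipad".toList, "dji".toList, "gopro".toList, "sony".toList, "canon".toList,
    "nikon".toList, "fujifilm".toList, "olympus".toList, "panasonic".toList, "pentax".toList,
    "leica".toList, "hasselblad".toList ]

-- the 'while "__" in s: s = s.replace("__", "_")' loop; fuel s.length is enough because each
-- iteration strictly shortens s (lemma rSpec_len below), so this is exactly Python's loop
def squashGoA : Nat → List Char → List Char
  | 0, s => s
  | fuel + 1, s =>
    if PySem.Chars.isIn ['_', '_'] s then squashGoA fuel (PySem.Chars.replace s ['_', '_'] ['_'])
    else s

def squashWhileA (s : List Char) : List Char := squashGoA s.length s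

def cleanA (s0 : List Char) : List Char :=
  let s1 := PySem.Chars.strip s0
  let s2 := PySem.Chars.replace s1 "Corporation".toList []
  let s3 := PySem.Chars.replace s2 "Inc.".toList []
  let s4 := PySem.Chars.replace s3 "Inc".toList []
  let s5 := PySem.Chars.replace s4 "Company".toList []
  let s6 := PySem.Chars.replace s5 "Ltd.".toList []
  let s7 := PySem.Chars.replace s6 "Ltd".toList []
  let s8 := PySem.Chars.strip s7
  let parts := PySem.Chars.split₀ s8
  let cleaned := parts.foldl (fun acc part =>
    let pl := PySem.Chars.lower part
    if brandsA.contains pl then acc ++ [pyCapitalize part]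
    else if PySem.Chars.startswith pl "ilce-".toList || PySem.Chars.startswith pl "dsc-".toList then
      acc ++ [PySem.Chars.upper part]
    else acc ++ [pyCapitalize part]) []
  let s9 := PySem.Chars.join [' '] cleaned
  let s10 := [[' '], ['/'], ['\\'], ['-']].foldl (fun s ch => PySem.Chars.replace s ch ['_']) s9
  let s11 := squashWhileA s10
  PySem.Chars.stripChars s11 ['_']

def iphoneLoopA : List (List Char) → List Char → List Char
  | [], mn => mn
  | part :: rest, mn =>
    if PySem.Chars.isIn "IPHONE".toList (PySem.Chars.upper part) && part.any PySem.Chars.isdigit then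
      PySem.Chars.replace part ['_'] []
    else iphoneLoopA rest mn

def cascadeA (model : List Char) : List Char :=
  if PySem.Chars.isIn "ILCE_7M3".toList model || PySem.Chars.isIn "ILCE_7M3".toList model then "A7III".toList
  else if PySem.Chars.isIn "ILCE_7M4".toList model then "A7IV".toList
  else if PySem.Chars.isIn "ILCE_7RM3".toList model || PySem.Chars.isIn "ILCE_7RM3A".toList model then "A7RIII".toList
  else if PySem.Chars.isIn "ILCE_7RM4".toList model then "A7RIV".toList
  else if PySem.Chars.isIn "ILCE_7RM5".toList model then "A7RV".toList
  else if PySem.Chars.isIn "ILCE_9".toList model then "A9".toList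
  else if PySem.Chars.isIn "ILCE_1".toList model then "A1".toList
  else if PySem.Chars.isIn "MAVIC".toList (PySem.Chars.upper model) && PySem.Chars.isIn ['3'] model then "Mavic3".toList
  else if PySem.Chars.isIn "MAVIC".toList (PySem.Chars.upper model) && PySem.Chars.isIn ['2'] model then "Mavic2".toList
  else if PySem.Chars.isIn "IPHONE".toList (PySem.Chars.upper model) then
    iphoneLoopA (PySem.Chars.splitOn model ['_']) model
  else model

def normalize_camera_name (raw_make : Option String) (raw_model : Option String) : String :=
  let makeT : Bool := match raw_make with | none => false | some s => !s.toList.isEmpty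
  let modelT : Bool := match raw_model with | none => false | some s => !s.toList.isEmpty
  if !makeT && !modelT then "UnknownCamera"
  else
    let make := match raw_make with | none => [] | some s => if s.toList.isEmpty then [] else cleanA s.toList
    let model := match raw_model with | none => [] | some s => if s.toList.isEmpty then [] else cleanA s.toList
    let mn := cascadeA model
    if !make.isEmpty && !mn.isEmpty then
      if PySem.Chars.startswith (PySem.Chars.lower mn) (PySem.Chars.lower make) then String.ofList mn
      else String.ofList (make ++ '_' :: mn)   -- f"{make}_{model_normalized}"
    else if !make.isEmpty then String.ofList make
    else if !mn.isEmpty then String.ofList mn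
    else "UnknownCamera"

-- ===== PORT B =====

def junkB : List (List Char) :=
  ["Corporation".toList, "Inc.".toList, "Inc".toList, "Company".toList, "Ltd.".toList, "Ltd".toList]

def sonyTableB : List (List Char × List Char) :=
  [ ("ILCE_7M3".toList, "A7III".toList), ("ILCE_7M4".toList, "A7IV".toList),
    ("ILCE_7RM3".toList, "A7RIII".toList), ("ILCE_7RM4".toList, "A7RIV".toList),
    ("ILCE_7RM5".toList, "A7RV".toList), ("ILCE_9".toList, "A9".toList),
    ("ILCE_1".toList, "A1".toList) ]

def sepB (c : Char) : Bool := " /\\-_".toList.contains c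

def fixWordB (w : List Char) : List Char :=
  if PySem.Chars.startswith (PySem.Chars.lower w) "ilce-".toList ||
     PySem.Chars.startswith (PySem.Chars.lower w) "dsc-".toList then PySem.Chars.upper w
  else pyCapitalize w

def tokStepB (p : List (List Char) × List Char) (ch : Char) : List (List Char) × List Char :=
  if sepB ch then (if p.2.isEmpty then p else (p.1 ++ [p.2], [])) else (p.1, p.2 ++ [ch])

def cleanB (s0 : List Char) : List Char :=
  let s1 := PySem.Chars.strip s0
  let s2 := junkB.foldl (fun s junk => PySem.Chars.replace s junk []) s1
  let tokens := (PySem.Chars.split₀ s2).foldl (fun toks word =>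
    let st := (fixWordB word).foldl tokStepB (toks, ([] : List Char))
    if st.2.isEmpty then st.1 else st.1 ++ [st.2]) []
  PySem.Chars.join ['_'] tokens

def scanSonyB : List (List Char × List Char) → List Char → Option (List Char)
  | [], _ => none
  | e :: rest, m => if PySem.Chars.isIn e.1 m then some e.2 else scanSonyB rest m

def iphoneScanB : List (List Char) → Option (List Char)
  | [] => none
  | p :: rest =>
    if PySem.Chars.isIn "IPHONE".toList (PySem.Chars.upper p) && p.any PySem.Chars.isdigit then some p
    else iphoneScanB rest

def normalizeModelB (model : List Char) : List Char :=
  match scanSonyB sonyTableB model with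
  | some name => name
  | none =>
    let u := PySem.Chars.upper model
    let tail :=
      if PySem.Chars.isIn "IPHONE".toList u then
        match iphoneScanB (PySem.Chars.splitOn model ['_']) with
        | some p => p
        | none => model
      else model
    if PySem.Chars.isIn "MAVIC".toList u then
      if PySem.Chars.isIn ['3'] model then "Mavic3".toList
      else if PySem.Chars.isIn ['2'] model then "Mavic2".toList
      else tail
    else tail

def normalize_camera_name_alt (raw_make : Option String) (raw_model : Option String) : String :=
  let make := cleanB (raw_make.getD "").toList
  let model := normalizeModelB (cleanB (raw_model.getD "").toList)
  let name :=
    if PySem.Chars.startswith (PySem.Chars.lower model) (PySem.Chars.lower make) then model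
    else PySem.Chars.join ['_'] ([make, model].filter (fun p => !p.isEmpty))
  if name.isEmpty then "UnknownCamera" else String.ofList name

-- ===== PRECONDITION & SPEC =====
def Spec_normalize_camera_name (raw_make : Option String) (raw_model : Option String) (out : String) : Prop := out = normalize_camera_name_alt raw_make raw_model
instance (raw_make : Option String) (raw_model : Option String) (out : String) : Decidable (Spec_normalize_camera_name raw_make raw_model out) := by unfold Spec_normalize_camera_name; infer_instance

-- ===== CLAIM (what is proved, stated in full; the proofs are below) =====
def Claim_equal_normalize_camera_name : Prop := ∀ (raw_make : Option String) (raw_model : Option String), Dom_normalize_camera_name raw_make raw_model → Spec_normalize_camera_name raw_make raw_model (normalize_camera_name raw_make raw_model)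

-- ===== LEMMAS AND PROOFS =====

-- ---- Chars.replace with a single-character pattern is a flatMap ----

theorem replace_go_zero (old new l acc : List Char) :
    PySem.Chars.replace.go old new 0 l acc = acc.reverse ++ l := rfl

theorem replace_go_nil (old new : List Char) (fuel : Nat) (acc : List Char) :
    PySem.Chars.replace.go old new fuel [] acc = acc.reverse := by
  cases fuel <;> simp [PySem.Chars.replace.go]

theorem replace_go_succ (old new : List Char) (fuel : Nat) (c : Char) (t acc : List Char) :
    PySem.Chars.replace.go old new (fuel + 1) (c :: t) acc =
      if old.isPrefixOf (c :: t) then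
        PySem.Chars.replace.go old new fuel (List.drop old.length (c :: t)) (new.reverse ++ acc)
      else PySem.Chars.replace.go old new fuel t (c :: acc) := rfl

theorem replace_go_single (a : Char) (new : List Char) :
    ∀ (fuel : Nat) (l acc : List Char), l.length ≤ fuel →
      PySem.Chars.replace.go [a] new fuel l acc =
        acc.reverse ++ l.flatMap (fun c => if c == a then new else [c]) := by
  intro fuel
  induction fuel with
  | zero =>
    intro l acc h
    have hl : l = [] := List.length_eq_zero_iff.mp (Nat.le_zero.mp h)
    subst hl; simp [replace_go_zero]
  | succ fuel ih =>
    intro l acc h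
    cases l with
    | nil => simp [replace_go_nil]
    | cons c t =>
      rw [replace_go_succ]
      have hpre : ([a].isPrefixOf (c :: t)) = (a == c) := by
        simp [List.isPrefixOf]
      rw [hpre]
      by_cases hc : c = a
      · subst hc
        rw [if_pos (by simp)]
        rw [show List.drop (List.length [c]) (c :: t) = t from rfl]
        rw [ih _ _ (by simpa using Nat.le_of_succ_le_succ h)]
        simp
      · rw [if_neg (by simp [beq_iff_eq]; exact fun h' => (hc h'.symm).elim)]
        rw [ih _ _ (by simpa using Nat.le_of_succ_le_succ h)]
        simp only [beq_iff_eq, List.flatMap_cons, if_neg hc]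
        simp

theorem replace_single_flatMap (a : Char) (new cs : List Char) :
    PySem.Chars.replace cs [a] new = cs.flatMap (fun c => if c == a then new else [c]) := by
  unfold PySem.Chars.replace
  simp only [List.isEmpty_cons, Bool.false_eq_true, if_false]
  exact replace_go_single a new cs.length cs [] le_rfl

theorem replace_single_map (a b : Char) (cs : List Char) :
    PySem.Chars.replace cs [a] [b] = cs.map (fun c => if c == a then b else c) := by
  rw [replace_single_flatMap]
  induction cs with
  | nil => rfl
  | cons c t ih =>
    simp only [beq_iff_eq] at ih ⊢
    by_cases h : c = a <;> simp [h, ih]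

theorem replace_single_not_mem (a : Char) (new cs : List Char) (h : a ∉ cs) :
    PySem.Chars.replace cs [a] new = cs := by
  rw [replace_single_flatMap]
  induction cs with
  | nil => rfl
  | cons c t ih =>
    simp only [List.mem_cons, not_or] at h
    simp only [beq_iff_eq] at ih ⊢
    simp [Ne.symm h.1, ih h.2]

-- ---- one pass of s.replace("__", "_") ----

def rSpec : List Char → List Char
  | [] => []
  | [c] => [c]
  | c :: d :: t => if c = '_' ∧ d = '_' then '_' :: rSpec t else c :: rSpec (d :: t)

theorem replace_go_uu : ∀ (fuel : Nat) (l acc : List Char), l.length ≤ fuel →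
    PySem.Chars.replace.go ['_', '_'] ['_'] fuel l acc = acc.reverse ++ rSpec l := by
  intro fuel
  induction fuel with
  | zero =>
    intro l acc h
    have : l = [] := List.length_eq_zero_iff.mp (Nat.le_zero.mp h)
    subst this; simp [replace_go_zero, rSpec]
  | succ fuel ih =>
    intro l acc h
    match l with
    | [] => simp [replace_go_nil, rSpec]
    | [c] =>
      rw [replace_go_succ]
      have hp : (['_', '_'].isPrefixOf [c]) = false := by
        simp [List.isPrefixOf]
      rw [hp]
      simp only [Bool.false_eq_true, if_false]
      rw [replace_go_nil]
      simp [rSpec]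
    | c :: d :: t =>
      rw [replace_go_succ]
      have hpre : (['_', '_'].isPrefixOf (c :: d :: t)) = (c == '_' && d == '_') := by
        have e1 : ('_' == c) = (c == '_') := by by_cases h : c = '_' <;> simp [h, eq_comm]
        have e2 : ('_' == d) = (d == '_') := by by_cases h : d = '_' <;> simp [h, eq_comm]
        simp [List.isPrefixOf, e1, e2]
      rw [hpre]
      by_cases hc : c = '_' ∧ d = '_'
      · obtain ⟨hc1, hc2⟩ := hc
        subst hc1; subst hc2
        rw [if_pos (by simp)]
        rw [show List.drop (List.length ['_', '_']) ('_' :: '_' :: t) = t from rfl]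
        rw [ih t _ (by simp at h ⊢; omega)]
        simp [rSpec]
      · have hb : (c == '_' && d == '_') = false := by
          by_cases h1 : c = '_' <;> by_cases h2 : d = '_' <;> simp [h1, h2] at hc ⊢
        rw [hb]
        simp only [Bool.false_eq_true, if_false]
        rw [ih (d :: t) _ (by simp at h ⊢; omega)]
        simp [rSpec, if_neg hc]

theorem replace_uu (cs : List Char) :
    PySem.Chars.replace cs ['_', '_'] ['_'] = rSpec cs := by
  unfold PySem.Chars.replace
  simp only [List.isEmpty_cons, Bool.false_eq_true, if_false]
  exact replace_go_uu cs.length cs [] le_rfl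

-- ---- "__" occurs ↔ two adjacent underscores ----

def noUU : List Char → Bool
  | c :: d :: t => !(c == '_' && d == '_') && noUU (d :: t)
  | _ => true

theorem infix_uu_iff (cs : List Char) : (['_', '_'] <:+: cs) ↔ noUU cs = false := by
  induction cs with
  | nil => simp [noUU]
  | cons c t ih =>
    rw [List.infix_cons_iff]
    cases t with
    | nil =>
      simp only [noUU]
      constructor
      · rintro (h | h)
        · have := h.length_le; simp at this
        · have := h.length_le; simp at this
      · simp
    | cons d t2 =>
      have hpre : (['_', '_'] <+: c :: d :: t2) ↔ (c = '_' ∧ d = '_') := by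
        simp [List.cons_prefix_cons, eq_comm]
      rw [hpre, ih]
      show _ ↔ (!(c == '_' && d == '_') && noUU (d :: t2)) = false
      by_cases h1 : c = '_' <;> by_cases h2 : d = '_' <;> simp [h1, h2]

theorem isIn_uu (cs : List Char) : PySem.Chars.isIn ['_', '_'] cs = !noUU cs := by
  by_cases h : noUU cs
  · have : ¬ (['_', '_'] <:+: cs) := by rw [infix_uu_iff]; simp [h]
    rw [h]
    simpa using (PySem.Chars.isIn_eq_false_iff _ _).mpr this
  · have hn : noUU cs = false := by simpa using h
    have : (['_', '_'] <:+: cs) := (infix_uu_iff cs).mpr hn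
    rw [hn]
    simpa using (PySem.Chars.isIn_iff_infix _ _).mpr this

theorem rSpec_le (cs : List Char) : (rSpec cs).length ≤ cs.length := by
  induction cs using rSpec.induct with
  | case1 => simp [rSpec]
  | case2 c => simp [rSpec]
  | case3 c d t h ih => simp only [rSpec, if_pos h]; simp at ih ⊢; omega
  | case4 c d t h ih => simp only [rSpec, if_neg h]; simp at ih ⊢; omega

theorem rSpec_len (cs : List Char) (h : noUU cs = false) : (rSpec cs).length < cs.length := by
  induction cs using rSpec.induct with
  | case1 => simp [noUU] at h
  | case2 c => simp [noUU] at h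
  | case3 c d t huu ih =>
    simp only [rSpec, if_pos huu]
    have := rSpec_le t; simp at this ⊢; omega
  | case4 c d t huu ih =>
    simp only [rSpec, if_neg huu]
    have hdt : noUU (d :: t) = false := by
      by_contra hcon
      have hdt' : noUU (d :: t) = true := by simpa using hcon
      have : noUU (c :: d :: t) = true := by
        show (!(c == '_' && d == '_') && noUU (d :: t)) = true
        have : (c == '_' && d == '_') = false := by
          by_cases h1 : c = '_' <;> by_cases h2 : d = '_' <;> simp_all
        simp [this, hdt']
      simp [this] at h
    have := ih hdt; simp at this ⊢; omega

-- ---- the run-collapsing normal form sq2 ----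

def sq2 : Bool → List Char → List Char
  | _, [] => []
  | b, c :: t => if c = '_' then (if b then sq2 true t else '_' :: sq2 true t) else c :: sq2 false t

theorem sq2_rSpec (cs : List Char) : ∀ b, sq2 b (rSpec cs) = sq2 b cs := by
  induction cs using rSpec.induct with
  | case1 => intro b; rfl
  | case2 c => intro b; rfl
  | case3 c d t h ih =>
    obtain ⟨h1, h2⟩ := h; subst h1; subst h2
    intro b
    cases b <;> simp [rSpec, sq2, ih]
  | case4 c d t h ih =>
    intro b
    simp only [rSpec, if_neg h]
    by_cases hc : c = '_'
    · subst hc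
      have hd : ¬ d = '_' := fun hd => h ⟨rfl, hd⟩
      cases b <;> simp [sq2, ih]
    · cases b <;> simp [sq2, hc, ih]

theorem noUU_tail (c : Char) (t : List Char) (h : noUU (c :: t) = true) : noUU t = true := by
  cases t with
  | nil => rfl
  | cons d t2 =>
    have : (!(c == '_' && d == '_') && noUU (d :: t2)) = true := h
    simp only [Bool.and_eq_true] at this
    exact this.2

theorem sq2_fix (cs : List Char) (h : noUU cs = true) :
    sq2 false cs = cs ∧ (cs.head? ≠ some '_' → sq2 true cs = cs) := by
  induction cs with
  | nil => exact ⟨rfl, fun _ => rfl⟩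
  | cons c t ih =>
    have ht := noUU_tail c t h
    obtain ⟨ihf, iht⟩ := ih ht
    by_cases hc : c = '_'
    · subst hc
      have hhd : t.head? ≠ some '_' := by
        cases t with
        | nil => simp
        | cons d t2 =>
          have : (!(('_' : Char) == '_' && d == '_') && noUU (d :: t2)) = true := h
          simp only [Bool.and_eq_true, Bool.not_eq_true'] at this
          have hd : ¬ d = '_' := by
            intro hd; subst hd; simp at this
          simp [hd]
      constructor
      · simp [sq2, iht hhd]
      · intro hcon; simp at hcon
    · constructor
      · simp [sq2, hc, ihf]
      · intro _; simp [sq2, hc, ihf]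

theorem squashGoA_eq (fuel : Nat) : ∀ cs : List Char, cs.length ≤ fuel → squashGoA fuel cs = sq2 false cs := by
  induction fuel with
  | zero =>
    intro cs h
    have : cs = [] := List.length_eq_zero_iff.mp (Nat.le_zero.mp h)
    subst this; rfl
  | succ fuel ih =>
    intro cs h
    show (if PySem.Chars.isIn ['_', '_'] cs then squashGoA fuel (PySem.Chars.replace cs ['_', '_'] ['_']) else cs) = _
    rw [isIn_uu]
    by_cases huu : noUU cs
    · rw [huu]
      simp only [Bool.not_true, Bool.false_eq_true, if_false]
      exact ((sq2_fix cs huu).1).symm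
    · have hn : noUU cs = false := by simpa using huu
      rw [hn]
      simp only [Bool.not_false, if_true]
      rw [replace_uu]
      rw [ih (rSpec cs) (by have := rSpec_len cs hn; omega)]
      exact sq2_rSpec cs false

theorem squashWhileA_eq (cs : List Char) : squashWhileA cs = sq2 false cs :=
  squashGoA_eq cs.length cs le_rfl

-- ---- per-word transform: brand words never start with "ilce-"/"dsc-" ----

theorem word_branch_eq (part : List Char) :
    (let pl := PySem.Chars.lower part
     if brandsA.contains pl then pyCapitalize part
     else if PySem.Chars.startswith pl "ilce-".toList || PySem.Chars.startswith pl "dsc-".toList then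
       PySem.Chars.upper part
     else pyCapitalize part)
    = fixWordB part := by
  unfold fixWordB
  by_cases hb : brandsA.contains (PySem.Chars.lower part)
  · have hmem : PySem.Chars.lower part ∈ brandsA := by simpa using hb
    have hs : (PySem.Chars.startswith (PySem.Chars.lower part) "ilce-".toList ||
               PySem.Chars.startswith (PySem.Chars.lower part) "dsc-".toList) = false := by
      simp only [brandsA, List.mem_cons, List.not_mem_nil, or_false] at hmem
      rcases hmem with h | h | h | h | h | h | h | h | h | h | h | h | h <;> rw [h] <;> decide
    simp only [hb, if_true, hs]
    simp
  · simp only [hb]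
    simp

theorem words_eq (parts : List (List Char)) :
    parts.foldl (fun acc part =>
      let pl := PySem.Chars.lower part
      if brandsA.contains pl then acc ++ [pyCapitalize part]
      else if PySem.Chars.startswith pl "ilce-".toList || PySem.Chars.startswith pl "dsc-".toList then
        acc ++ [PySem.Chars.upper part]
      else acc ++ [pyCapitalize part]) [] =
    parts.map fixWordB := by
  have hfun : (fun (acc : List (List Char)) part =>
      let pl := PySem.Chars.lower part
      if brandsA.contains pl then acc ++ [pyCapitalize part]
      else if PySem.Chars.startswith pl "ilce-".toList || PySem.Chars.startswith pl "dsc-".toList then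
        acc ++ [PySem.Chars.upper part]
      else acc ++ [pyCapitalize part]) =
      (fun acc part => acc ++ [fixWordB part]) := by
    funext acc part
    have hw := word_branch_eq part
    simp only at hw
    show (if brandsA.contains (PySem.Chars.lower part) then acc ++ [pyCapitalize part]
      else if PySem.Chars.startswith (PySem.Chars.lower part) "ilce-".toList ||
              PySem.Chars.startswith (PySem.Chars.lower part) "dsc-".toList then
        acc ++ [PySem.Chars.upper part]
      else acc ++ [pyCapitalize part]) = _
    rw [← hw]
    split_ifs <;> rfl
  rw [hfun, PySem.List.foldl_append_singleton_eq_map]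
  simp

-- ---- split₀ ignores leading/trailing whitespace (split₀ ∘ strip = split₀) ----

theorem split₀_go_ws (ws : List Char) (hws : ∀ c ∈ ws, PySem.Chars.isspace c) :
    ∀ (cur : List Char) (acc : List (List Char)),
      PySem.Chars.split₀.go ws cur acc = PySem.Chars.split₀.go [] cur acc := by
  induction ws with
  | nil => intro cur acc; rfl
  | cons w ws' ih =>
    intro cur acc
    have hw : PySem.Chars.isspace w := hws w (by simp)
    show (if PySem.Chars.isspace w then
            if cur.isEmpty then PySem.Chars.split₀.go ws' [] acc
            else PySem.Chars.split₀.go ws' [] (cur.reverse :: acc)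
          else PySem.Chars.split₀.go ws' (w :: cur) acc) = _
    rw [if_pos hw]
    by_cases hc : cur.isEmpty
    · rw [if_pos hc, ih (fun c hc => hws c (by simp [hc]))]
      have : cur = [] := List.isEmpty_iff.mp hc
      subst this
      rfl
    · rw [if_neg hc, ih (fun c hc => hws c (by simp [hc]))]
      show _ = (if cur.isEmpty then acc.reverse else (cur.reverse :: acc).reverse)
      rw [if_neg hc]
      rfl

theorem split₀_go_append_ws (s ws : List Char) (hws : ∀ c ∈ ws, PySem.Chars.isspace c) :
    ∀ (cur : List Char) (acc : List (List Char)),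
      PySem.Chars.split₀.go (s ++ ws) cur acc = PySem.Chars.split₀.go s cur acc := by
  induction s with
  | nil => intro cur acc; simpa using split₀_go_ws ws hws cur acc
  | cons c s' ih =>
    intro cur acc
    show (if PySem.Chars.isspace c then
            if cur.isEmpty then PySem.Chars.split₀.go (s' ++ ws) [] acc
            else PySem.Chars.split₀.go (s' ++ ws) [] (cur.reverse :: acc)
          else PySem.Chars.split₀.go (s' ++ ws) (c :: cur) acc) =
          (if PySem.Chars.isspace c then
            if cur.isEmpty then PySem.Chars.split₀.go s' [] acc
            else PySem.Chars.split₀.go s' [] (cur.reverse :: acc)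
          else PySem.Chars.split₀.go s' (c :: cur) acc)
    rw [ih, ih, ih]

theorem split₀_lstrip (x : List Char) :
    PySem.Chars.split₀ (PySem.Chars.lstrip x) = PySem.Chars.split₀ x := by
  unfold PySem.Chars.split₀ PySem.Chars.lstrip
  induction x with
  | nil => rfl
  | cons c t ih =>
    by_cases hc : PySem.Chars.isspace c
    · rw [List.dropWhile_cons_of_pos (by simpa using hc)]
      rw [ih]
      show _ = (if PySem.Chars.isspace c then
          if ([] : List Char).isEmpty then PySem.Chars.split₀.go t [] []
          else PySem.Chars.split₀.go t [] ([] : List (List Char)) else PySem.Chars.split₀.go t [c] [])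
      rw [if_pos hc]
      rfl
    · rw [List.dropWhile_cons_of_neg (by simpa using hc)]

theorem split₀_strip (x : List Char) :
    PySem.Chars.split₀ (PySem.Chars.strip x) = PySem.Chars.split₀ x := by
  unfold PySem.Chars.strip
  rw [← split₀_lstrip x]
  set y := PySem.Chars.lstrip x with hy
  have hdecomp : y = PySem.Chars.rstrip y ++ (List.takeWhile PySem.Chars.isspace y.reverse).reverse := by
    unfold PySem.Chars.rstrip
    have h2 := congrArg List.reverse
      (List.takeWhile_append_dropWhile (p := PySem.Chars.isspace) (l := y.reverse))
    simp only [List.reverse_append, List.reverse_reverse] at h2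
    exact h2.symm
  conv_rhs => rw [hdecomp]
  unfold PySem.Chars.split₀
  rw [split₀_go_append_ws]
  intro c hc
  have := List.mem_takeWhile_imp (by simpa using hc)
  simpa using this

-- ---- separator mapping: the four replace passes are one map ----

def sepMapC (c : Char) : Char := if [' ', '/', '\\', '-'].contains c then '_' else c

theorem four_replaces_eq (s : List Char) :
    PySem.Chars.replace (PySem.Chars.replace (PySem.Chars.replace
      (PySem.Chars.replace s [' '] ['_']) ['/'] ['_']) ['\\'] ['_']) ['-'] ['_']
      = s.map sepMapC := by
  rw [replace_single_map ' ' '_' s, replace_single_map '/' '_', replace_single_map '\\' '_',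
      replace_single_map '-' '_']
  simp only [List.map_map]
  apply List.map_congr_left
  intro c _
  simp only [Function.comp, sepMapC]
  by_cases h1 : c = ' ' <;> by_cases h2 : c = '/' <;> by_cases h3 : c = '\\' <;> by_cases h4 : c = '-' <;>
    simp_all

-- ---- sq2 on the mapped string, phrased over the original characters ----

def sqS : Bool → List Char → List Char
  | _, [] => []
  | b, c :: t => if sepB c then (if b then sqS true t else '_' :: sqS true t) else c :: sqS false t

theorem sepB_iff (c : Char) : sepB c = true ↔ c ∈ [' ', '/', '\\', '-', '_'] := by
  unfold sepB
  rw [show " /\\-_".toList = [' ', '/', '\\', '-', '_'] from by decide]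
  simp

theorem sepB_cases (c : Char) (h : sepB c = true) : sepMapC c = '_' := by
  have hm := (sepB_iff c).mp h
  fin_cases hm <;> rfl

theorem not_sepB (c : Char) (h : sepB c = false) : sepMapC c = c ∧ c ≠ '_' := by
  have h' : ¬ (c = ' ' ∨ c = '/' ∨ c = '\\' ∨ c = '-' ∨ c = '_') := by
    intro hc
    have := (sepB_iff c).mpr (by simpa using hc)
    rw [h] at this
    cases this
  push_neg at h'
  obtain ⟨n1, n2, n3, n4, n5⟩ := h'
  refine ⟨?_, n5⟩
  simp only [sepMapC, List.contains_eq_mem]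
  rw [if_neg]
  simp [n1, n2, n3, n4]

theorem sq2_map_sepMap (t : List Char) : ∀ b, sq2 b (t.map sepMapC) = sqS b t := by
  induction t with
  | nil => intro b; rfl
  | cons c t ih =>
    intro b
    by_cases h : sepB c
    · have hm := sepB_cases c h
      simp only [List.map_cons, hm, sq2, sqS, if_pos rfl, h, if_true]
      cases b <;> simp [ih]
    · have hb : sepB c = false := by simpa using h
      obtain ⟨hm, hne⟩ := not_sepB c hb
      simp only [List.map_cons, hm, sq2, sqS, hb, Bool.false_eq_true, if_false, if_neg hne]
      rw [ih]

-- ---- the runs specification ----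

def runsR : List Char → List Char → List (List Char)
  | cur, [] => if cur.isEmpty then [] else [cur]
  | cur, c :: t => if sepB c then (if cur.isEmpty then runsR [] t else cur :: runsR [] t) else runsR (cur ++ [c]) t

theorem runsR_ne : ∀ (t cur : List Char), ∀ r ∈ runsR cur t, r ≠ [] := by
  intro t
  induction t with
  | nil =>
    intro cur r hr
    simp only [runsR] at hr
    by_cases hc : cur.isEmpty
    · simp [hc] at hr
    · rw [if_neg hc] at hr
      simp at hr
      subst hr
      simpa using hc
  | cons c t ih =>
    intro cur r hr
    simp only [runsR] at hr
    by_cases hs : sepB c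
    · rw [if_pos hs] at hr
      by_cases hc : cur.isEmpty
      · rw [if_pos hc] at hr; exact ih [] r hr
      · rw [if_neg hc] at hr
        rcases List.mem_cons.mp hr with h | h
        · subst h; simpa using hc
        · exact ih [] r h
    · rw [if_neg hs] at hr
      exact ih (cur ++ [c]) r hr

-- B's inner token loop computes runsR
def flushB (st : List (List Char) × List Char) : List (List Char) :=
  if st.2.isEmpty then st.1 else st.1 ++ [st.2]

theorem tok_foldl (w : List Char) : ∀ (toks : List (List Char)) (cur : List Char),
    flushB (w.foldl tokStepB (toks, cur)) = toks ++ runsR cur w := by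
  induction w with
  | nil =>
    intro toks cur
    simp only [List.foldl_nil, flushB, runsR]
    by_cases hc : cur.isEmpty <;> simp [hc]
  | cons c w' ih =>
    intro toks cur
    simp only [List.foldl_cons, tokStepB, runsR]
    by_cases hs : sepB c
    · rw [if_pos hs, if_pos hs]
      by_cases hc : cur.isEmpty
      · rw [if_pos hc, if_pos hc]
        have : cur = [] := List.isEmpty_iff.mp hc
        subst this
        exact ih toks []
      · rw [if_neg hc, if_neg hc]
        rw [ih (toks ++ [cur]) []]
        simp
    · rw [if_neg hs, if_neg hs]
      exact ih toks (cur ++ [c])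

theorem tok_outer (ws : List (List Char)) : ∀ toks : List (List Char),
    ws.foldl (fun toks word =>
      if (List.foldl tokStepB (toks, ([] : List Char)) (fixWordB word)).2.isEmpty then
        (List.foldl tokStepB (toks, ([] : List Char)) (fixWordB word)).1
      else (List.foldl tokStepB (toks, ([] : List Char)) (fixWordB word)).1
        ++ [(List.foldl tokStepB (toks, ([] : List Char)) (fixWordB word)).2]) toks
    = toks ++ ws.flatMap (fun w => runsR [] (fixWordB w)) := by
  induction ws with
  | nil => intro toks; simp
  | cons w ws' ih =>
    intro toks
    simp only [List.foldl_cons, List.flatMap_cons]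
    have h := tok_foldl (fixWordB w) toks []
    simp only [flushB] at h
    rw [h, ih]
    simp

-- runsR distributes over the space-join
theorem runsR_append_sep (a : List Char) : ∀ (cur b : List Char),
    runsR cur (a ++ ' ' :: b) = runsR cur a ++ runsR [] b := by
  induction a with
  | nil =>
    intro cur b
    simp only [List.nil_append, runsR]
    rw [if_pos (by decide)]
    by_cases hc : cur.isEmpty
    · simp [hc]
    · simp [hc]
  | cons c a' ih =>
    intro cur b
    simp only [List.cons_append, runsR]
    by_cases hs : sepB c
    · rw [if_pos hs, if_pos hs]
      by_cases hc : cur.isEmpty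
      · rw [if_pos hc, if_pos hc, ih]
      · rw [if_neg hc, if_neg hc, ih]
        simp
    · rw [if_neg hs, if_neg hs, ih]

theorem runsR_join (vs : List (List Char)) :
    runsR [] (PySem.Chars.join [' '] vs) = vs.flatMap (fun v => runsR [] v) := by
  induction vs with
  | nil => rfl
  | cons v vs' ih =>
    cases vs' with
    | nil => simp [PySem.Chars.join, List.intercalate]
    | cons v2 rest =>
      have hj : PySem.Chars.join [' '] (v :: v2 :: rest) = v ++ ' ' :: PySem.Chars.join [' '] (v2 :: rest) := by
        simp [PySem.Chars.join, List.intercalate, List.intersperse]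
      rw [hj, runsR_append_sep, ih]
      simp

-- ---- strip('_') of the squashed string is the '_'-join of the runs ----

def pU (c : Char) : Bool := (['_'] : List Char).contains c

def rdropU (l : List Char) : List Char := (List.dropWhile pU l.reverse).reverse

theorem sqS_true_head (t : List Char) : List.dropWhile pU (sqS true t) = sqS true t := by
  induction t with
  | nil => rfl
  | cons c t ih =>
    by_cases hs : sepB c
    · show List.dropWhile pU (if sepB c then (if true = true then sqS true t else '_' :: sqS true t) else c :: sqS false t) = _
      rw [if_pos hs, if_pos rfl]
      rw [ih]
      show _ = (if sepB c then (if true = true then sqS true t else '_' :: sqS true t) else c :: sqS false t)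
      rw [if_pos hs, if_pos rfl]
    · have hne : c ≠ '_' := (not_sepB c (by simpa using hs)).2
      show List.dropWhile pU (if sepB c then _ else c :: sqS false t) = (if sepB c then _ else c :: sqS false t)
      rw [if_neg (by simpa using hs)]
      rw [List.dropWhile_cons_of_neg]
      simp [pU, hne]

theorem sqS_false_drop (t : List Char) : List.dropWhile pU (sqS false t) = sqS true t := by
  induction t with
  | nil => rfl
  | cons c t ih =>
    by_cases hs : sepB c
    · show List.dropWhile pU (if sepB c then (if false = true then _ else '_' :: sqS true t) else c :: sqS false t) = _
      rw [if_pos hs]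
      simp only [Bool.false_eq_true, if_false]
      rw [List.dropWhile_cons_of_pos (by simp [pU])]
      rw [sqS_true_head]
      show _ = (if sepB c then sqS true t else c :: sqS false t)
      rw [if_pos hs]
    · have hne : c ≠ '_' := (not_sepB c (by simpa using hs)).2
      show List.dropWhile pU (if sepB c then _ else c :: sqS false t) = (if sepB c then _ else c :: sqS false t)
      rw [if_neg (by simpa using hs), if_neg (by simpa using hs)]
      rw [List.dropWhile_cons_of_neg]
      simp [pU, hne]

theorem rdropU_nomem (l : List Char) (h : '_' ∉ l) : rdropU l = l := by
  unfold rdropU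
  have hd : List.dropWhile pU l.reverse = l.reverse := by
    cases hr : l.reverse with
    | nil => rfl
    | cons a t =>
      have ha : a ∈ l := by
        rw [← List.mem_reverse, hr]; exact List.mem_cons_self
      have hpa : pU a = false := by
        simp only [pU, List.contains_eq_mem, List.mem_singleton, decide_eq_false_iff_not]
        intro hc; exact h (hc ▸ ha)
      exact List.dropWhile_cons_of_neg (by simp [hpa])
  rw [hd, List.reverse_reverse]

theorem rdropU_append (a b : List Char) :
    rdropU (a ++ b) = if rdropU b = [] then rdropU a else a ++ rdropU b := by
  unfold rdropU
  rw [List.reverse_append, List.dropWhile_append]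
  by_cases hb : (List.dropWhile pU b.reverse).isEmpty
  · rw [if_pos hb]
    rw [if_pos]
    simp [List.isEmpty_iff.mp hb]
  · rw [if_neg hb]
    rw [if_neg]
    · simp
    · intro hcon
      apply hb
      have : List.dropWhile pU b.reverse = [] := by
        have := congrArg List.reverse hcon
        simpa using this
      simp [this]

theorem join_cons_ne (cur : List Char) (rs : List (List Char)) (h : rs ≠ []) :
    PySem.Chars.join ['_'] (cur :: rs) = cur ++ '_' :: PySem.Chars.join ['_'] rs := by
  cases rs with
  | nil => exact absurd rfl h
  | cons r rest => simp [PySem.Chars.join, List.intercalate, List.intersperse]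

theorem join_ne_nil (rs : List (List Char)) (h : rs ≠ []) (hne : ∀ r ∈ rs, r ≠ []) :
    PySem.Chars.join ['_'] rs ≠ [] := by
  cases rs with
  | nil => exact absurd rfl h
  | cons r rest =>
    cases rest with
    | nil =>
      have : PySem.Chars.join ['_'] [r] = r := by simp [PySem.Chars.join, List.intercalate]
      rw [this]
      exact hne r (by simp)
    | cons r2 rest2 =>
      rw [join_cons_ne r (r2 :: rest2) (by simp)]
      have := hne r (by simp)
      intro hcon
      rcases List.append_eq_nil_iff.mp hcon with ⟨h1, _⟩
      exact this h1

theorem sqS_rdrop_main (t : List Char) :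
    rdropU (sqS true t) = PySem.Chars.join ['_'] (runsR [] t) ∧
    (∀ cur, cur ≠ [] → '_' ∉ cur → rdropU (cur ++ sqS false t) = PySem.Chars.join ['_'] (runsR cur t)) := by
  induction t with
  | nil =>
    refine ⟨rfl, ?_⟩
    intro cur hcne hmem
    show rdropU (cur ++ []) = _
    rw [List.append_nil, rdropU_nomem cur hmem]
    simp only [runsR]
    rw [if_neg (by simpa using hcne)]
    simp [PySem.Chars.join, List.intercalate]
  | cons c t ih =>
    obtain ⟨ihM, ihG⟩ := ih
    by_cases hs : sepB c
    · constructor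
      · show rdropU (if sepB c = true then (if true = true then sqS true t else '_' :: sqS true t) else c :: sqS false t)
            = PySem.Chars.join ['_'] (runsR [] (c :: t))
        rw [if_pos hs, if_pos rfl]
        simp only [runsR]
        rw [if_pos hs, if_pos (by simp)]
        exact ihM
      · intro cur hcne hmem
        show rdropU (cur ++ (if sepB c = true then (if false = true then sqS true t else '_' :: sqS true t) else c :: sqS false t))
            = PySem.Chars.join ['_'] (runsR cur (c :: t))
        rw [if_pos hs]
        simp only [Bool.false_eq_true, if_false]
        have hrw : runsR cur (c :: t) = cur :: runsR [] t := by
          simp only [runsR]; rw [if_pos hs, if_neg (by simpa using hcne)]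
        rw [hrw]
        rw [show cur ++ '_' :: sqS true t = cur ++ (['_'] ++ sqS true t) from by simp]
        rw [rdropU_append cur (['_'] ++ sqS true t), rdropU_append ['_'] (sqS true t), ihM]
        by_cases hz : runsR [] t = []
        · have hjz : PySem.Chars.join ['_'] (runsR [] t) = [] := by rw [hz]; rfl
          rw [hjz, if_pos rfl, show rdropU ['_'] = [] from by decide, if_pos rfl,
              rdropU_nomem cur hmem, hz]
          simp [PySem.Chars.join, List.intercalate]
        · have hjnz : PySem.Chars.join ['_'] (runsR [] t) ≠ [] := join_ne_nil _ hz (runsR_ne t [])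
          rw [if_neg hjnz, if_neg (by simp), join_cons_ne cur (runsR [] t) hz]
          simp
    · have hnsep : sepB c = false := by simpa using hs
      have hcne : c ≠ '_' := (not_sepB c hnsep).2
      constructor
      · show rdropU (if sepB c = true then (if true = true then sqS true t else '_' :: sqS true t) else c :: sqS false t)
            = PySem.Chars.join ['_'] (runsR [] (c :: t))
        rw [if_neg (by simp [hnsep])]
        have := ihG [c] (by simp) (by simp [Ne.symm hcne])
        simp only [List.cons_append, List.nil_append] at this
        rw [this]
        simp only [runsR]
        rw [if_neg (by simp [hnsep])]
        simp
      · intro cur hce hmem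
        show rdropU (cur ++ (if sepB c = true then (if false = true then sqS true t else '_' :: sqS true t) else c :: sqS false t))
            = PySem.Chars.join ['_'] (runsR cur (c :: t))
        rw [if_neg (by simp [hnsep])]
        rw [show cur ++ c :: sqS false t = (cur ++ [c]) ++ sqS false t from by simp]
        rw [ihG (cur ++ [c]) (by simp) (by
          intro hq
          rcases List.mem_append.mp hq with h | h
          · exact hmem h
          · simp at h; exact hcne h.symm)]
        simp only [runsR]
        rw [if_neg (by simp [hnsep])]

-- ---- splitOn by "_" yields parts without "_" ----

theorem splitOn_go_nil (sep : List Char) (fuel : Nat) (cur : List Char) (acc : List (List Char)) :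
    PySem.Chars.splitOn.go sep (fuel + 1) [] cur acc = (cur.reverse :: acc).reverse := rfl

theorem splitOn_go_cons (sep : List Char) (fuel : Nat) (c : Char) (rest cur : List Char) (acc : List (List Char)) :
    PySem.Chars.splitOn.go sep (fuel + 1) (c :: rest) cur acc =
      if sep.isPrefixOf (c :: rest) then
        PySem.Chars.splitOn.go sep fuel (List.drop sep.length (c :: rest)) [] (cur.reverse :: acc)
      else PySem.Chars.splitOn.go sep fuel rest (c :: cur) acc := rfl

theorem splitOn_go_no_sep (fuel : Nat) : ∀ (l cur : List Char) (acc : List (List Char)),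
    l.length < fuel → ('_' ∉ cur) → (∀ p ∈ acc, '_' ∉ p) →
    ∀ p ∈ PySem.Chars.splitOn.go ['_'] fuel l cur acc, '_' ∉ p := by
  induction fuel with
  | zero => intro l cur acc h; omega
  | succ fuel ih =>
    intro l cur acc h hcur hacc
    cases l with
    | nil =>
      rw [splitOn_go_nil]
      intro p hp
      simp only [List.mem_reverse, List.mem_cons] at hp
      rcases hp with hp | hp
      · subst hp; simpa using hcur
      · exact hacc p hp
    | cons c rest =>
      rw [splitOn_go_cons]
      by_cases hc : c = '_'
      · subst hc
        rw [if_pos (by simp [List.isPrefixOf])]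
        refine ih _ _ _ (by simp at h ⊢; omega) (by simp) ?_
        intro p hp
        simp only [List.mem_cons] at hp
        rcases hp with hp | hp
        · subst hp; simpa using hcur
        · exact hacc p hp
      · rw [if_neg (by simp [List.isPrefixOf]; exact fun h' => (hc h'.symm).elim)]
        refine ih _ _ _ (by simp at h ⊢; omega) ?_ hacc
        intro hmem
        rcases List.mem_cons.mp hmem with h' | h'
        · exact hc h'.symm
        · exact hcur h'

theorem splitOn_no_underscore (m : List Char) : ∀ p ∈ PySem.Chars.splitOn m ['_'], '_' ∉ p := by
  unfold PySem.Chars.splitOn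
  exact splitOn_go_no_sep (m.length + 1) m [] [] (by omega) (by simp) (by simp)

-- ---- the iPhone scans agree ----

theorem iphone_eq (parts : List (List Char)) (mn : List Char) (h : ∀ p ∈ parts, '_' ∉ p) :
    iphoneLoopA parts mn = (match iphoneScanB parts with | some p => p | none => mn) := by
  induction parts with
  | nil => rfl
  | cons p rest ih =>
    show (if PySem.Chars.isIn "IPHONE".toList (PySem.Chars.upper p) && p.any PySem.Chars.isdigit then
        PySem.Chars.replace p ['_'] [] else iphoneLoopA rest mn) = _
    by_cases hc : (PySem.Chars.isIn "IPHONE".toList (PySem.Chars.upper p) && p.any PySem.Chars.isdigit) = true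
    · rw [if_pos hc]
      show _ = (match (if PySem.Chars.isIn "IPHONE".toList (PySem.Chars.upper p) && p.any PySem.Chars.isdigit
          then some p else iphoneScanB rest) with | some q => q | none => mn)
      rw [if_pos hc]
      exact replace_single_not_mem '_' [] p (h p (by simp))
    · rw [if_neg hc]
      show _ = (match (if PySem.Chars.isIn "IPHONE".toList (PySem.Chars.upper p) && p.any PySem.Chars.isdigit
          then some p else iphoneScanB rest) with | some q => q | none => mn)
      rw [if_neg hc]
      exact ih (fun q hq => h q (by simp [hq]))

-- ---- the model cascades agree ----

theorem isIn_7RM3A_mono (m : List Char) (h : PySem.Chars.isIn "ILCE_7RM3A".toList m = true) :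
    PySem.Chars.isIn "ILCE_7RM3".toList m = true := by
  rw [PySem.Chars.isIn_iff_infix] at h ⊢
  have hp : "ILCE_7RM3".toList <+: "ILCE_7RM3A".toList := by decide
  exact hp.isInfix.trans h

theorem cascade_eq (model : List Char) : cascadeA model = normalizeModelB model := by
  unfold cascadeA normalizeModelB
  simp only [scanSonyB, sonyTableB]
  have hiph := iphone_eq (PySem.Chars.splitOn model ['_']) model (splitOn_no_underscore model)
  simp
  by_cases h1 : PySem.Chars.isIn ['I','L','C','E','_','7','M','3'] model = true
  · simp [h1]
  · by_cases h2 : PySem.Chars.isIn ['I','L','C','E','_','7','M','4'] model = true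
    · simp [h1, h2]
    · by_cases h3 : PySem.Chars.isIn ['I','L','C','E','_','7','R','M','3'] model = true
      · simp [h1, h2, h3]
      · by_cases h3a : PySem.Chars.isIn ['I','L','C','E','_','7','R','M','3','A'] model = true
        · exact absurd (isIn_7RM3A_mono model (by simpa using h3a)) (by simpa using h3)
        · by_cases h4 : PySem.Chars.isIn ['I','L','C','E','_','7','R','M','4'] model = true
          · simp [h1, h2, h3, h3a, h4]
          · by_cases h5 : PySem.Chars.isIn ['I','L','C','E','_','7','R','M','5'] model = true
            · simp [h1, h2, h3, h3a, h4, h5]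
            · by_cases h6 : PySem.Chars.isIn ['I','L','C','E','_','9'] model = true
              · simp [h1, h2, h3, h3a, h4, h5, h6]
              · by_cases h7 : PySem.Chars.isIn ['I','L','C','E','_','1'] model = true
                · simp [h1, h2, h3, h3a, h4, h5, h6, h7]
                · by_cases hm : PySem.Chars.isIn ['M','A','V','I','C'] (PySem.Chars.upper model) = true
                  · by_cases hd3 : PySem.Chars.isIn ['3'] model = true
                    · simp [h1, h2, h3, h3a, h4, h5, h6, h7, hm, hd3]
                    · by_cases hd2 : PySem.Chars.isIn ['2'] model = true
                      · simp [h1, h2, h3, h3a, h4, h5, h6, h7, hm, hd3, hd2]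
                      · by_cases hi : PySem.Chars.isIn ['I','P','H','O','N','E'] (PySem.Chars.upper model) = true
                        · simp [h1, h2, h3, h3a, h4, h5, h6, h7, hm, hd3, hd2, hi, hiph]
                        · simp [h1, h2, h3, h3a, h4, h5, h6, h7, hm, hd3, hd2, hi]
                  · by_cases hi : PySem.Chars.isIn ['I','P','H','O','N','E'] (PySem.Chars.upper model) = true
                    · simp [h1, h2, h3, h3a, h4, h5, h6, h7, hm, hi, hiph]
                    · simp [h1, h2, h3, h3a, h4, h5, h6, h7, hm, hi]

-- ---- the cleaners agree ----

theorem stripChars_underscore (l : List Char) :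
    PySem.Chars.stripChars l ['_'] = rdropU (List.dropWhile pU l) := rfl

theorem clean_eq (cs : List Char) : cleanA cs = cleanB cs := by
  unfold cleanA cleanB
  simp only [junkB, List.foldl_cons, List.foldl_nil]
  rw [split₀_strip, words_eq, four_replaces_eq, squashWhileA_eq, sq2_map_sepMap,
      stripChars_underscore, sqS_false_drop, (sqS_rdrop_main _).1, runsR_join, tok_outer]
  simp [List.flatMap_map]

-- ---- glue: emptiness facts and the final assembly ----

theorem cleanB_nil : cleanB [] = [] := rfl

theorem nmB_nil : normalizeModelB [] = [] := by decide

theorem asm_eq (make mn : List Char) :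
    (if !make.isEmpty && !mn.isEmpty then
       (if PySem.Chars.startswith (PySem.Chars.lower mn) (PySem.Chars.lower make) then String.ofList mn
        else String.ofList (make ++ '_' :: mn))
     else if !make.isEmpty then String.ofList make
     else if !mn.isEmpty then String.ofList mn
     else "UnknownCamera")
    =
    (if (if PySem.Chars.startswith (PySem.Chars.lower mn) (PySem.Chars.lower make) then mn
         else PySem.Chars.join ['_'] ([make, mn].filter (fun p => !p.isEmpty))).isEmpty then "UnknownCamera"
     else String.ofList (if PySem.Chars.startswith (PySem.Chars.lower mn) (PySem.Chars.lower make) then mn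
         else PySem.Chars.join ['_'] ([make, mn].filter (fun p => !p.isEmpty)))) := by
  by_cases hm : make = []
  · subst hm
    by_cases hn : mn = []
    · subst hn; rfl
    · have hsw : PySem.Chars.startswith (PySem.Chars.lower mn) (PySem.Chars.lower []) = true := by
        simp [PySem.Chars.startswith, PySem.Chars.lower, List.isPrefixOf]
      simp [hsw, hn]
  · by_cases hn : mn = []
    · subst hn
      have hsw : PySem.Chars.startswith (PySem.Chars.lower []) (PySem.Chars.lower make) = false := by
        cases make with
        | nil => exact absurd rfl hm
        | cons a l => simp [PySem.Chars.startswith, PySem.Chars.lower, List.isPrefixOf]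
      simp [hsw, hm, PySem.Chars.join, List.intercalate]
    · by_cases hsw : PySem.Chars.startswith (PySem.Chars.lower mn) (PySem.Chars.lower make) = true
      · simp [hsw, hm, hn]
      · have hsw' : PySem.Chars.startswith (PySem.Chars.lower mn) (PySem.Chars.lower make) = false := by
          simpa using hsw
        simp [hsw', hm, hn, PySem.Chars.join, List.intercalate, List.intersperse]

theorem asm_eq_nil_make (mn : List Char) :
    (if !mn.isEmpty then String.ofList mn else "UnknownCamera")
    = (if (if PySem.Chars.startswith (PySem.Chars.lower mn) (PySem.Chars.lower ([] : List Char)) then mn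
         else PySem.Chars.join ['_'] ([([] : List Char), mn].filter (fun p => !p.isEmpty))).isEmpty then "UnknownCamera"
     else String.ofList (if PySem.Chars.startswith (PySem.Chars.lower mn) (PySem.Chars.lower ([] : List Char)) then mn
         else PySem.Chars.join ['_'] ([([] : List Char), mn].filter (fun p => !p.isEmpty)))) := by
  by_cases hn : mn = []
  · subst hn; decide
  · have hsw : PySem.Chars.startswith (PySem.Chars.lower mn) (PySem.Chars.lower ([] : List Char)) = true := by
      simp [PySem.Chars.startswith, PySem.Chars.lower, List.isPrefixOf]
    simp [hsw, hn]

theorem asm_eq_nil_mn (make : List Char) :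
    (if !make.isEmpty then String.ofList make else "UnknownCamera")
    = (if (if PySem.Chars.startswith (PySem.Chars.lower ([] : List Char)) (PySem.Chars.lower make) then ([] : List Char)
         else PySem.Chars.join ['_'] ([make, ([] : List Char)].filter (fun p => !p.isEmpty))).isEmpty then "UnknownCamera"
     else String.ofList (if PySem.Chars.startswith (PySem.Chars.lower ([] : List Char)) (PySem.Chars.lower make) then ([] : List Char)
         else PySem.Chars.join ['_'] ([make, ([] : List Char)].filter (fun p => !p.isEmpty)))) := by
  by_cases hm : make = []
  · subst hm; decide
  · have hsw : PySem.Chars.startswith (PySem.Chars.lower ([] : List Char)) (PySem.Chars.lower make) = false := by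
      cases make with
      | nil => exact absurd rfl hm
      | cons a l => simp [PySem.Chars.startswith, PySem.Chars.lower, List.isPrefixOf]
    simp [hsw, hm, PySem.Chars.join, List.intercalate]

theorem main_eq (raw_make raw_model : Option String) :
    normalize_camera_name raw_make raw_model = normalize_camera_name_alt raw_make raw_model := by
  have hempty : ("" : String).toList = [] := rfl
  cases raw_make with
  | none =>
    cases raw_model with
    | none =>
      simp only [normalize_camera_name, normalize_camera_name_alt, Option.getD_none, hempty,
        cleanB_nil, nmB_nil]
      decide
    | some t =>
      by_cases het : t.toList.isEmpty
      · have ht : t.toList = [] := List.isEmpty_iff.mp het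
        simp only [normalize_camera_name, normalize_camera_name_alt, Option.getD_none,
          Option.getD_some, hempty, ht, cleanB_nil, nmB_nil, List.isEmpty_nil, Bool.not_true,
          Bool.and_self, Bool.false_and, Bool.and_false, if_true]
        decide
      · have het' : t.toList.isEmpty = false := by simpa using het
        simp only [normalize_camera_name, normalize_camera_name_alt, Option.getD_none,
          Option.getD_some, hempty, het', cleanB_nil, clean_eq, cascade_eq, Bool.not_true,
          Bool.not_false, Bool.and_true, Bool.and_false, Bool.true_and, Bool.false_and,
          Bool.false_eq_true, if_false, if_true, List.isEmpty_nil]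
        exact asm_eq_nil_make (normalizeModelB (cleanB t.toList))
  | some s =>
    by_cases he : s.toList.isEmpty
    · have hs : s.toList = [] := List.isEmpty_iff.mp he
      cases raw_model with
      | none =>
        simp only [normalize_camera_name, normalize_camera_name_alt, Option.getD_none,
          Option.getD_some, hempty, hs, cleanB_nil, nmB_nil, List.isEmpty_nil]
        decide
      | some t =>
        by_cases het : t.toList.isEmpty
        · have ht : t.toList = [] := List.isEmpty_iff.mp het
          simp only [normalize_camera_name, normalize_camera_name_alt, Option.getD_some, hs, ht,
            cleanB_nil, nmB_nil, List.isEmpty_nil]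
          decide
        · have het' : t.toList.isEmpty = false := by simpa using het
          simp only [normalize_camera_name, normalize_camera_name_alt, Option.getD_some, hs,
            het', cleanB_nil, clean_eq, cascade_eq, Bool.not_true, Bool.not_false, Bool.and_true,
            Bool.and_false, Bool.true_and, Bool.false_and, Bool.false_eq_true, if_false, if_true,
            List.isEmpty_nil]
          exact asm_eq_nil_make (normalizeModelB (cleanB t.toList))
    · have he' : s.toList.isEmpty = false := by simpa using he
      cases raw_model with
      | none =>
        simp only [normalize_camera_name, normalize_camera_name_alt, Option.getD_none,
          Option.getD_some, hempty, he', cleanB_nil, nmB_nil, clean_eq, cascade_eq, Bool.not_true,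
          Bool.not_false, Bool.and_true, Bool.and_false, Bool.true_and, Bool.false_and,
          Bool.false_eq_true, if_false, if_true, List.isEmpty_nil]
        exact asm_eq_nil_mn (cleanB s.toList)
      | some t =>
        by_cases het : t.toList.isEmpty
        · have ht : t.toList = [] := List.isEmpty_iff.mp het
          simp only [normalize_camera_name, normalize_camera_name_alt, Option.getD_some, he', ht,
            cleanB_nil, nmB_nil, clean_eq, cascade_eq, Bool.not_true, Bool.not_false,
            Bool.and_true, Bool.and_false, Bool.true_and, Bool.false_and, Bool.false_eq_true,
            if_false, if_true, List.isEmpty_nil]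
          exact asm_eq_nil_mn (cleanB s.toList)
        · have het' : t.toList.isEmpty = false := by simpa using het
          simp only [normalize_camera_name, normalize_camera_name_alt, Option.getD_some, he',
            het', clean_eq, cascade_eq, Bool.not_true, Bool.not_false, Bool.and_true,
            Bool.and_false, Bool.true_and, Bool.false_and, Bool.false_eq_true, if_false, if_true]
          exact asm_eq (cleanB s.toList) (normalizeModelB (cleanB t.toList))

-- ===== VERDICT (by name: the statement is the Claim_ definition above) =====
theorem normalize_camera_name_spec : Claim_equal_normalize_camera_name := by
  intro raw_make raw_model _
  unfold Spec_normalize_camera_name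
  exact main_eq raw_make raw_model
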